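-- pv_equiv track=rewrite | github.com/VladimirTaDev/proyecto_2_automatas_celulares_tec_ii_2025 | cerebro_de_brian_logica.py | transicion
-- ===== SOURCE A (Python) =====
-- from copy import deepcopy
--
-- def obtener_vecinos(M, f, c):
--     """
--     Obtiene los estados de los 8 vecinos de la celda en posición (f, c).
--     La matriz se interpreta como un toroide (bordes conectados).
--     Entradas:
--     - M (list): matriz actual del autómata
--     - f (int): fila de la celda
--     - c (int): columna de la celda
--     Salida:
--     - vecinos (list): lista con los 8 estados vecinos de la celda
--     """
--     vecinos = []
--     filas = len(M)
--     columnas = len(M[0])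
--
--     for df in (-1, 0, 1):
--         for dc in (-1, 0, 1):
--             if df == 0 and dc == 0:
--                 continue
--             nf = (f + df) % filas
--             nc = (c + dc) % columnas
--             vecinos.append(M[nf][nc])
--
--     return vecinos
--
-- def transicion_celula(estado, vecinos):
--     """
--     Calcula el siguiente estado de una célula según las reglas de 'Cerebro de Brian'.
--     Entradas:
--     - estado (int): estado actual de la célula (0: muerta, 1: viva, 2: refractaria)
--     - vecinos (list): lista de estados de los vecinos de la célula
--     Salida:
--     - nuevo estado (int): estado actualizado de la célula
--     """
--     vivos = vecinos.count(1)
--     if estado == 0 and vivos == 2: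
--         return 1
--     elif estado == 1:
--         return 2
--     elif estado == 2:
--         return 0
--     return estado
--
-- def transicion(M):
--     """
--     Aplica las reglas de actualización del autómata 'El cerebro de Brian' a
--     toda la matriz.
--     Entradas:
--     - M (list): matriz actual del autómata
--     Salida:
--     - M2 (list): nueva matriz tras aplicar las reglas:
--     """
--     M2 = deepcopy(M)
--     filas = len(M)
--     columnas = len(M[0])
--     for f in range(filas):
--         for c in range(columnas):
--             vecinos = obtener_vecinos(M,f,c)
--             M2[f][c] = transicion_celula(M[f][c],vecinos)
--
--     return M2
-- ===== SOURCE B (Python) =====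
-- def transicion(M):
--     h, w = len(M), len(M[0])
--     live = [[1 if v == 1 else 0 for v in row[:w]] for row in M]
--     counts = [[0] * w for _ in range(h)]
--     for df in (-1, 0, 1):
--         for dc in (-1, 0, 1):
--             if df == 0 and dc == 0:
--                 continue
--             shifted = [r[dc:] + r[:dc] for r in live[df:] + live[:df]]
--             counts = [[a + b for a, b in zip(cr, sr)] for cr, sr in zip(counts, shifted)]
--     out = []
--     for f, row in enumerate(M):
--         new_row = list(row)
--         for c in range(w):
--             v = row[c]
--             new_row[c] = 1 if v == 0 and counts[f][c] == 2 else 2 if v == 1 else 0 if v == 2 else v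
--         out.append(new_row)
--     return out
-- ===== Notes on version B (the rewrite author's own statement) =====
-- stated objective: alternative
-- what changed: Instead of gathering the 8 neighbours of every cell into a list and counting, B builds the live-cell indicator grid once, sums its 8 toroidal rotations (shift-and-add, done with slicing and zips instead of per-cell neighbour indexing) into a counts matrix, then applies the Brian's-Brain rule in one final pass over the grid.
import Mathlib
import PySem

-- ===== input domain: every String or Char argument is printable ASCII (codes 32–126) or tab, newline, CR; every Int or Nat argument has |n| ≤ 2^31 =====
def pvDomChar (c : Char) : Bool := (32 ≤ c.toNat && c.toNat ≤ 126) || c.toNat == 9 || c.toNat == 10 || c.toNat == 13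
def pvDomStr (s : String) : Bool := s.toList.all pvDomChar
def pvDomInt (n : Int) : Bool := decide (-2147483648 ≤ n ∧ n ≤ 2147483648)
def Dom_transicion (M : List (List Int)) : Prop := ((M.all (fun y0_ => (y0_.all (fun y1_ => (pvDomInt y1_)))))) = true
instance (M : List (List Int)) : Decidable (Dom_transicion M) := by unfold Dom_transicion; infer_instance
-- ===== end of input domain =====

-- B replaces A's per-cell neighbour gathering by a shift-and-add pass: the live-cell indicator
-- grid is rotated to the 8 toroidal offsets and summed elementwise, then one map applies the
-- Brian's-Brain rule (return value only; A mutates nothing observable, it deep-copies M first).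

-- ===== PORT A =====
def obtenerVecinos (M : List (List Int)) (f c : Int) : List Int :=
  let filas : Int := (M.length : Int)
  let columnas : Int := ((PySem.List.pyGetD M 0 []).length : Int)
  ([-1, 0, 1] : List Int).foldl (fun vecinos df =>
    ([-1, 0, 1] : List Int).foldl (fun vecinos dc =>
      if df = 0 ∧ dc = 0 then vecinos
      else
        let nf := PySem.Int.mod (f + df) filas
        let nc := PySem.Int.mod (c + dc) columnas
        vecinos ++ [PySem.List.pyGetD (PySem.List.pyGetD M nf []) nc 0]) vecinos) []

def transicionCelula (estado : Int) (vecinos : List Int) : Int :=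
  let vivos := PySem.List.count vecinos 1
  if estado = 0 ∧ vivos = 2 then 1
  else if estado = 1 then 2
  else if estado = 2 then 0
  else estado

def transicion (M : List (List Int)) : List (List Int) :=
  let filas : Int := (M.length : Int)
  let columnas : Int := ((PySem.List.pyGetD M 0 []).length : Int)
  (PySem.List.pyRange 0 filas).foldl (fun M2 f =>
    (PySem.List.pyRange 0 columnas).foldl (fun M2 c =>
      let vecinos := obtenerVecinos M f c
      PySem.List.pySetD M2 f
        (PySem.List.pySetD (PySem.List.pyGetD M2 f []) c
          (transicionCelula (PySem.List.pyGetD (PySem.List.pyGetD M f []) c 0) vecinos))) M2) M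

-- ===== PORT B =====
-- rotacion xs k = xs[k:] + xs[:k]  (used with k ∈ {-1, 0, 1})
def rotacion {α : Type} (xs : List α) (k : Int) : List α :=
  PySem.List.slice xs (some k) none ++ PySem.List.slice xs none (some k)

def liveG (M : List (List Int)) : List (List Int) :=
  M.map (fun row =>
    (PySem.List.slice row none (some ((PySem.List.pyGetD M 0 []).length : Int))).map
      (fun v => if v = 1 then 1 else 0))

def countsG (M : List (List Int)) : List (List Int) :=
  let h := M.length
  let w := (PySem.List.pyGetD M 0 []).length
  ([-1, 0, 1] : List Int).foldl (fun counts df =>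
    ([-1, 0, 1] : List Int).foldl (fun counts dc =>
      if df = 0 ∧ dc = 0 then counts
      else
        List.zipWith (fun cr sr => List.zipWith (· + ·) cr sr) counts
          ((rotacion (liveG M) df).map (fun row => rotacion row dc))) counts)
    (List.replicate h (List.replicate w 0))

def transicion_alt (M : List (List Int)) : List (List Int) :=
  let counts := countsG M
  (PySem.List.enumerate M).foldl (fun out fr =>
    out ++ [(PySem.List.pyRange 0 ((PySem.List.pyGetD M 0 []).length : Int)).foldl (fun nr ci =>
      let v := PySem.List.pyGetD fr.2 ci 0
      PySem.List.pySetD nr ci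
        (if v = 0 ∧ PySem.List.pyGetD (PySem.List.pyGetD counts fr.1 []) ci 0 = 2 then 1
         else if v = 1 then 2
         else if v = 2 then 0
         else v)) fr.2]) []

-- ===== PRECONDITION & SPEC =====
-- Pre_ excludes exactly the inputs on which A raises IndexError: the empty matrix (M[0]) and
-- matrices with a row shorter than len(M[0]) (a toroidal neighbour access lands past its end).
def Pre_transicion (M : List (List Int)) : Prop :=
  M ≠ [] ∧ ∀ row ∈ M, (M.headD []).length ≤ row.length
instance (M : List (List Int)) : Decidable (Pre_transicion M) := by unfold Pre_transicion; infer_instance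

def pvWitness_transicion : List (List Int) := [[1, 0], [2, 1]]

def Spec_transicion (M : List (List Int)) (out : List (List Int)) : Prop := out = transicion_alt M
instance (M : List (List Int)) (out : List (List Int)) : Decidable (Spec_transicion M out) := by unfold Spec_transicion; infer_instance

-- ===== CLAIM (what is proved, stated in full; the proofs are below) =====
def Claim_equal_transicion : Prop := ∀ (M : List (List Int)), Dom_transicion M → Pre_transicion M → Spec_transicion M (transicion M)


-- ===== LEMMAS AND PROOFS =====

-- abbreviations used only by the proofs
def pvW (M : List (List Int)) : Nat := (PySem.List.pyGetD M 0 []).length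

def pvN (M : List (List Int)) (a b : Nat) : Int := (M.getD a []).getD b 0

def pvVal (M : List (List Int)) (f c : Nat) : Int :=
  transicionCelula ((M.getD f []).getD c 0) (obtenerVecinos M (f : Int) (c : Int))

def pvStep (M : List (List Int)) (g : List (List Int)) (f : Nat) : List (List Int) :=
  (List.range (pvW M)).foldl (fun g c => g.set f ((g.getD f []).set c (pvVal M f c))) g

def pvAdd (a b : List (List Int)) : List (List Int) :=
  List.zipWith (fun cr sr => List.zipWith (· + ·) cr sr) a b

def pvS (M : List (List Int)) (df dc : Int) : List (List Int) :=
  (rotacion (liveG M) df).map (fun row => rotacion row dc)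

def pvShape (P : List (List Int)) (h w : Nat) : Prop :=
  P.length = h ∧ ∀ f, f < h → (P.getD f []).length = w

def pvRI (k : Int) (i n : Nat) : Nat :=
  if k = 1 then (i + 1) % n else if k = -1 then (i + (n - 1)) % n else i

def pvVec (M : List (List Int)) (f c : Nat) : List Int :=
  [pvN M ((f + (M.length - 1)) % M.length) ((c + (pvW M - 1)) % pvW M),
   pvN M ((f + (M.length - 1)) % M.length) c,
   pvN M ((f + (M.length - 1)) % M.length) ((c + 1) % pvW M),
   pvN M f ((c + (pvW M - 1)) % pvW M),
   pvN M f ((c + 1) % pvW M),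
   pvN M ((f + 1) % M.length) ((c + (pvW M - 1)) % pvW M),
   pvN M ((f + 1) % M.length) c,
   pvN M ((f + 1) % M.length) ((c + 1) % pvW M)]

def pvBval (M : List (List Int)) (f c : Nat) : Int :=
  if (M.getD f []).getD c 0 = 0 ∧ ((countsG M).getD f []).getD c 0 = 2 then 1
  else if (M.getD f []).getD c 0 = 1 then 2
  else if (M.getD f []).getD c 0 = 2 then 0
  else (M.getD f []).getD c 0

lemma pvW_eq_headD (M : List (List Int)) : pvW M = (M.headD []).length := by
  cases M <;> simp [pvW, PySem.List.pyGetD_zero]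

lemma pv_getD_map {α β : Type} (l : List α) (g : α → β) (f : Nat) (hf : f < l.length)
    (d₁ : α) (d₂ : β) : (l.map g).getD f d₂ = g (l.getD f d₁) := by
  rw [List.getD_eq_getElem _ _ (by simpa using hf), List.getElem_map, List.getD_eq_getElem _ _ hf]

-- ---------- A side: loop characterization ----------

lemma rowfold_length (val : Nat → Int) (n : Nat) (r : List Int) :
    ((List.range n).foldl (fun r c => r.set c (val c)) r).length = r.length := by
  induction n with
  | zero => rfl
  | succ n ih => rw [List.range_succ, List.foldl_append]; simpa using ih

lemma rowfold_getElem (val : Nat → Int) (n : Nat) (r : List Int) (j : Nat) (hj : j < r.length) :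
    ((List.range n).foldl (fun r c => r.set c (val c)) r)[j]'(by rw [rowfold_length]; exact hj) =
      if j < n then val j else r[j] := by
  induction n with
  | zero => simp
  | succ n ih =>
    simp only [List.range_succ, List.foldl_append, List.foldl_cons, List.foldl_nil]
    rw [List.getElem_set]
    by_cases h : n = j
    · subst h; simp
    · rw [if_neg h, ih]
      by_cases h2 : j < n
      · rw [if_pos h2, if_pos (by omega)]
      · rw [if_neg h2, if_neg (by omega)]

lemma inner_factor (val : Nat → Int) (f : Nat) (n : Nat) (g : List (List Int)) (hf : f < g.length) :
    (List.range n).foldl (fun g c => g.set f ((g.getD f []).set c (val c))) g =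
      g.set f ((List.range n).foldl (fun r c => r.set c (val c)) (g.getD f [])) := by
  induction n with
  | zero =>
    simp only [List.range_zero, List.foldl_nil]
    rw [List.getD_eq_getElem _ _ hf, List.set_getElem_self]
  | succ n ih =>
    simp only [List.range_succ, List.foldl_append, List.foldl_cons, List.foldl_nil]
    rw [ih]
    have hf2 : f < (g.set f ((List.range n).foldl (fun r c => r.set c (val c)) (g.getD f []))).length := by
      simpa using hf
    rw [List.getD_eq_getElem _ _ hf2, List.getElem_set, if_pos rfl, List.set_set]

lemma transicion_eq_fold (M : List (List Int)) :
    transicion M = (List.range M.length).foldl (pvStep M) M := by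
  simp only [transicion, PySem.List.pyRange_zero_natCast, List.foldl_map,
    PySem.List.pySetD_natCast, PySem.List.pyGetD_natCast]
  rfl

lemma pvStep_length (M : List (List Int)) (g : List (List Int)) (f : Nat) :
    (pvStep M g f).length = g.length := by
  unfold pvStep
  induction (List.range (pvW M)) generalizing g with
  | nil => rfl
  | cons a t ih => rw [List.foldl_cons, ih]; simp

lemma Afold_length (M : List (List Int)) (n : Nat) :
    ((List.range n).foldl (pvStep M) M).length = M.length := by
  induction n with
  | zero => rfl
  | succ n ih => rw [List.range_succ, List.foldl_append]; simp [pvStep_length, ih]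

lemma Afold_getElem (M : List (List Int)) (n : Nat) (hn : n ≤ M.length) (i : Nat) (hi : i < M.length) :
    ((List.range n).foldl (pvStep M) M)[i]'(by rw [Afold_length]; exact hi) =
      if i < n then (List.range (pvW M)).foldl (fun r c => r.set c (pvVal M i c)) M[i]
      else M[i] := by
  induction n generalizing i hi with
  | zero => simp
  | succ n ih =>
    have hn' : n ≤ M.length := by omega
    simp only [List.range_succ, List.foldl_append, List.foldl_cons, List.foldl_nil]
    have hfac : pvStep M ((List.range n).foldl (pvStep M) M) n =
        ((List.range n).foldl (pvStep M) M).set n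
          ((List.range (pvW M)).foldl (fun r c => r.set c (pvVal M n c))
            (((List.range n).foldl (pvStep M) M).getD n [])) :=
      inner_factor _ _ _ _ (by rw [Afold_length]; omega)
    simp only [hfac]
    have hgd : (((List.range n).foldl (pvStep M) M)).getD n [] = M[n]'(by omega) := by
      rw [List.getD_eq_getElem _ _ (by rw [Afold_length]; omega)]
      rw [ih hn' n (by omega)]
      simp
    rw [List.getElem_set]
    by_cases h : n = i
    · subst h; rw [if_pos rfl, if_pos (by omega), hgd]
    · rw [if_neg h, ih hn' i hi]
      by_cases h2 : i < n
      · rw [if_pos h2, if_pos (by omega)]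
      · rw [if_neg h2, if_neg (by omega)]

lemma transicion_length (M : List (List Int)) : (transicion M).length = M.length := by
  rw [transicion_eq_fold]; exact Afold_length M M.length

lemma transicion_row (M : List (List Int)) (f : Nat) (hf : f < M.length) :
    (transicion M)[f]'(by rw [transicion_length]; exact hf) =
      (List.range (pvW M)).foldl (fun r c => r.set c (pvVal M f c)) M[f] := by
  have h1 := Afold_getElem M M.length (le_refl _) f hf
  rw [if_pos hf] at h1
  calc (transicion M)[f]'(by rw [transicion_length]; exact hf)
      = ((List.range M.length).foldl (pvStep M) M)[f]'(by rw [Afold_length]; exact hf) := by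
        congr 1
        exact transicion_eq_fold M
    _ = _ := h1

-- ---------- mod bridges ----------

lemma pvmod_add_one (i n : Nat) : PySem.Int.mod ((i : Int) + 1) (n : Int) =
    (((i + 1) % n : Nat) : Int) := by
  rw [show ((i : Int) + 1) = ((i + 1 : Nat) : Int) by push_cast; ring, PySem.Int.mod_natCast]

lemma pvmod_sub_one (i n : Nat) (hn : 0 < n) : PySem.Int.mod ((i : Int) - 1) (n : Int) =
    (((i + (n - 1)) % n : Nat) : Int) := by
  have h1 : ((i : Int) - 1) = ((i + (n - 1) : Nat) : Int) + (n : Int) * (-1) := by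
    push_cast [Nat.cast_sub (by omega : 1 ≤ n)]; ring
  rw [h1, PySem.Int.mod_eq_emod_of_pos (by exact_mod_cast hn), Int.add_mul_emod_self_left]
  norm_cast

-- ---------- B side: rotation characterization ----------

lemma rotacion_zero {α : Type} (xs : List α) : rotacion xs 0 = xs := by
  rw [rotacion, PySem.List.slice_zero_start, PySem.List.slice_none_none,
    PySem.List.slice_to xs (by norm_num)]
  simp

lemma rotacion_one_eq {α : Type} (xs : List α) : rotacion xs 1 = xs.tail ++ xs.take 1 := by
  rw [rotacion, PySem.List.slice_from_one, PySem.List.slice_to xs (by norm_num)]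
  norm_num

lemma rotacion_neg_one_eq {α : Type} (xs : List α) :
    rotacion xs (-1) = xs.drop (xs.length - 1) ++ xs.dropLast := by
  rw [rotacion, PySem.List.slice_from_neg_one, PySem.List.slice_to_neg_one]

lemma rot_length {α : Type} (xs : List α) (k : Int) (hk : k = -1 ∨ k = 0 ∨ k = 1) :
    (rotacion xs k).length = xs.length := by
  rcases hk with rfl | rfl | rfl
  · rw [rotacion_neg_one_eq]
    simp only [List.length_append, List.length_drop, List.length_dropLast]
    omega
  · rw [rotacion_zero]
  · rw [rotacion_one_eq]
    simp only [List.length_append, List.length_tail, List.length_take]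
    omega

lemma pvRI_lt (k : Int) (i n : Nat) (hi : i < n) : pvRI k i n < n := by
  unfold pvRI
  split_ifs <;> first | exact Nat.mod_lt _ (by omega) | exact hi

lemma rot_getD {α : Type} (xs : List α) (k : Int) (hk : k = -1 ∨ k = 0 ∨ k = 1)
    (i : Nat) (hi : i < xs.length) (d : α) :
    (rotacion xs k).getD i d = xs.getD (pvRI k i xs.length) d := by
  rw [List.getD_eq_getElem _ _ (by rw [rot_length _ _ hk]; exact hi),
    List.getD_eq_getElem _ _ (pvRI_lt k i xs.length hi)]
  rcases hk with rfl | rfl | rfl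
  · simp only [rotacion_neg_one_eq]
    have hRI : pvRI (-1) i xs.length = (i + (xs.length - 1)) % xs.length := by norm_num [pvRI]
    by_cases h : i = 0
    · subst h
      have hmod : (0 + (xs.length - 1)) % xs.length = xs.length - 1 := by
        rw [Nat.zero_add, Nat.mod_eq_of_lt (by omega)]
      rw [List.getElem_append_left (by simp [List.length_drop]; omega)]
      rw [List.getElem_drop]
      simp only [hRI, hmod, Nat.add_zero]
    · have hmod : (i + (xs.length - 1)) % xs.length = i - 1 := by
        rw [show i + (xs.length - 1) = (i - 1) + xs.length by omega, Nat.add_mod_right,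
          Nat.mod_eq_of_lt (by omega)]
      rw [List.getElem_append_right (by simp [List.length_drop]; omega)]
      rw [List.getElem_dropLast]
      simp only [hRI, hmod]
      congr 1
      simp only [List.length_drop]
      omega
  · simp [rotacion_zero, pvRI]
  · simp only [rotacion_one_eq]
    have hRI : pvRI 1 i xs.length = (i + 1) % xs.length := by norm_num [pvRI]
    by_cases h : i < xs.length - 1
    · have hmod : (i + 1) % xs.length = i + 1 := Nat.mod_eq_of_lt (by omega)
      rw [List.getElem_append_left (by simp [List.length_tail]; omega)]
      rw [List.getElem_tail]
      simp only [hRI, hmod]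
    · have hmod : (i + 1) % xs.length = 0 := by
        rw [show i + 1 = xs.length by omega, Nat.mod_self]
      rw [List.getElem_append_right (by simp [List.length_tail]; omega)]
      rw [List.getElem_take]
      simp only [hRI, hmod]
      congr 1
      simp only [List.length_tail]
      omega

lemma liveG_length (M : List (List Int)) : (liveG M).length = M.length := by simp [liveG]

lemma liveG_row (M : List (List Int)) (r : Nat) (hr : r < M.length) :
    (liveG M).getD r [] =
      ((M.getD r []).take (pvW M)).map (fun v => if v = 1 then 1 else 0) := by
  rw [liveG, pv_getD_map M _ r hr [] [], PySem.List.slice_to_natCast]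
  rfl

lemma liveG_row_length (M : List (List Int)) (r : Nat) (hr : r < M.length)
    (hge : ∀ row ∈ M, pvW M ≤ row.length) :
    ((liveG M).getD r []).length = pvW M := by
  rw [liveG_row M r hr, List.length_map, List.length_take]
  have : pvW M ≤ (M.getD r []).length := by
    rw [List.getD_eq_getElem _ _ hr]; exact hge _ (List.getElem_mem _)
  omega

lemma liveG_row_getD (M : List (List Int)) (r c : Nat) (hr : r < M.length) (hc : c < pvW M)
    (hge : ∀ row ∈ M, pvW M ≤ row.length) :
    ((liveG M).getD r []).getD c 0 = if pvN M r c = 1 then 1 else 0 := by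
  have hlen : pvW M ≤ (M.getD r []).length := by
    rw [List.getD_eq_getElem _ _ hr]; exact hge _ (List.getElem_mem _)
  rw [liveG_row M r hr,
    pv_getD_map _ _ c (by rw [List.length_take]; omega) 0 0]
  have htake : ((M.getD r []).take (pvW M)).getD c 0 = (M.getD r []).getD c 0 := by
    rw [List.getD_eq_getElem _ _ (by rw [List.length_take]; omega),
      List.getD_eq_getElem _ _ (by omega : c < (M.getD r []).length)]
    simp only [List.getElem_take]
  rw [htake]
  rfl

lemma pvS_getD (M : List (List Int)) (hge : ∀ row ∈ M, pvW M ≤ row.length)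
    (df dc : Int) (hdf : df = -1 ∨ df = 0 ∨ df = 1) (hdc : dc = -1 ∨ dc = 0 ∨ dc = 1)
    (f c : Nat) (hf : f < M.length) (hc : c < pvW M) :
    ((pvS M df dc).getD f []).getD c 0 =
      if pvN M (pvRI df f M.length) (pvRI dc c (pvW M)) = 1 then 1 else 0 := by
  have hlg : (liveG M).length = M.length := liveG_length M
  have hrl : pvRI df f M.length < M.length := pvRI_lt df f M.length hf
  have step1 : (pvS M df dc).getD f [] =
      rotacion ((rotacion (liveG M) df).getD f []) dc := by
    rw [pvS, pv_getD_map _ _ f (by rw [rot_length _ _ hdf, hlg]; exact hf) [] []]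
  rw [step1, rot_getD (liveG M) df hdf f (by rw [hlg]; exact hf) [], hlg]
  rw [rot_getD _ dc hdc c (by rw [liveG_row_length M _ hrl hge]; exact hc) 0,
    liveG_row_length M _ hrl hge]
  exact liveG_row_getD M _ _ hrl (pvRI_lt dc c (pvW M) hc) hge

lemma pvS_shape (M : List (List Int)) (hge : ∀ row ∈ M, pvW M ≤ row.length)
    (df dc : Int) (hdf : df = -1 ∨ df = 0 ∨ df = 1) (hdc : dc = -1 ∨ dc = 0 ∨ dc = 1) :
    pvShape (pvS M df dc) M.length (pvW M) := by
  constructor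
  · rw [pvS, List.length_map, rot_length _ _ hdf, liveG_length]
  · intro f hf
    have hlg := liveG_length M
    have hrl : pvRI df f M.length < M.length := pvRI_lt df f M.length hf
    have step1 : (pvS M df dc).getD f [] =
        rotacion ((rotacion (liveG M) df).getD f []) dc := by
      rw [pvS, pv_getD_map _ _ f (by rw [rot_length _ _ hdf, hlg]; exact hf) [] []]
    rw [step1, rot_getD (liveG M) df hdf f (by rw [hlg]; exact hf) [], hlg,
      rot_length _ _ hdc]
    exact liveG_row_length M _ hrl hge

lemma pvAdd_row {a b : List (List Int)} {h w : Nat}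
    (ha : pvShape a h w) (hb : pvShape b h w) (f : Nat) (hf : f < h) :
    (pvAdd a b).getD f [] = List.zipWith (· + ·) (a.getD f []) (b.getD f []) := by
  obtain ⟨ha1, ha2⟩ := ha
  obtain ⟨hb1, hb2⟩ := hb
  rw [pvAdd, List.getD_eq_getElem _ _ (by rw [List.length_zipWith, ha1, hb1, Nat.min_self]; exact hf),
    List.getElem_zipWith, List.getD_eq_getElem a [] (by omega), List.getD_eq_getElem b [] (by omega)]

lemma pvAdd_shape {a b : List (List Int)} {h w : Nat}
    (ha : pvShape a h w) (hb : pvShape b h w) : pvShape (pvAdd a b) h w := by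
  refine ⟨by rw [pvAdd, List.length_zipWith, ha.1, hb.1, Nat.min_self], ?_⟩
  intro f hf
  rw [pvAdd_row ha hb f hf, List.length_zipWith, ha.2 f hf, hb.2 f hf, Nat.min_self]

lemma pvAdd_getD {a b : List (List Int)} {h w : Nat}
    (ha : pvShape a h w) (hb : pvShape b h w) (f c : Nat) (hf : f < h) (hc : c < w) :
    ((pvAdd a b).getD f []).getD c 0 = (a.getD f []).getD c 0 + (b.getD f []).getD c 0 := by
  rw [pvAdd_row ha hb f hf,
    List.getD_eq_getElem _ _ (by rw [List.length_zipWith, ha.2 f hf, hb.2 f hf, Nat.min_self]; exact hc),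
    List.getElem_zipWith,
    List.getD_eq_getElem (a.getD f []) 0 (by rw [ha.2 f hf]; exact hc),
    List.getD_eq_getElem (b.getD f []) 0 (by rw [hb.2 f hf]; exact hc)]

lemma replicate_row (h w f : Nat) (hf : f < h) :
    (List.replicate h (List.replicate w (0 : Int))).getD f [] = List.replicate w 0 := by
  rw [List.getD_eq_getElem _ _ (by simpa using hf), List.getElem_replicate]

lemma replicate_shape (h w : Nat) : pvShape (List.replicate h (List.replicate w (0 : Int))) h w := by
  refine ⟨by simp, ?_⟩
  intro f hf
  rw [replicate_row h w f hf, List.length_replicate]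

lemma replicate_getD (h w f c : Nat) (hf : f < h) (hc : c < w) :
    ((List.replicate h (List.replicate w (0 : Int))).getD f []).getD c 0 = 0 := by
  rw [replicate_row h w f hf, List.getD_eq_getElem _ _ (by simpa using hc), List.getElem_replicate]

lemma foldl_pvAdd_spec (h w : Nat) (Ss : List (List (List Int))) :
    ∀ (P : List (List Int)), pvShape P h w → (∀ S ∈ Ss, pvShape S h w) →
      pvShape (Ss.foldl pvAdd P) h w ∧
      ∀ f c, f < h → c < w →
        ((Ss.foldl pvAdd P).getD f []).getD c 0 =
          (P.getD f []).getD c 0 + (Ss.map (fun S => (S.getD f []).getD c 0)).sum := by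
  induction Ss with
  | nil => intro P hP _; exact ⟨hP, by intro f c hf hc; simp⟩
  | cons S Ss ih =>
    intro P hP hS
    have hSh : pvShape S h w := hS S (by simp)
    have hRest : ∀ T ∈ Ss, pvShape T h w := fun T hT => hS T (by simp [hT])
    have hPS : pvShape (pvAdd P S) h w := pvAdd_shape hP hSh
    obtain ⟨hsh, hent⟩ := ih (pvAdd P S) hPS hRest
    refine ⟨by simpa using hsh, ?_⟩
    intro f c hf hc
    rw [List.foldl_cons, hent f c hf hc, pvAdd_getD hP hSh f c hf hc]
    simp [List.sum_cons]
    ring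

lemma countsG_eq (M : List (List Int)) :
    countsG M = ([((-1 : Int), (-1 : Int)), (-1, 0), (-1, 1), (0, -1), (0, 1),
        (1, -1), (1, 0), (1, 1)].map (fun p => pvS M p.1 p.2)).foldl pvAdd
      (List.replicate M.length (List.replicate (pvW M) 0)) := by
  simp only [countsG, pvS, pvAdd, pvW, List.foldl_cons, List.foldl_nil, List.map_cons,
    List.map_nil]
  norm_num

lemma countsG_getD (M : List (List Int)) (hge : ∀ row ∈ M, pvW M ≤ row.length)
    (f c : Nat) (hf : f < M.length) (hc : c < pvW M) :
    ((countsG M).getD f []).getD c 0 =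
      ((pvVec M f c).map (fun u => if u = 1 then (1 : Int) else 0)).sum := by
  rw [countsG_eq]
  have hS : ∀ S ∈ ([((-1 : Int), (-1 : Int)), (-1, 0), (-1, 1), (0, -1), (0, 1),
      (1, -1), (1, 0), (1, 1)].map (fun p => pvS M p.1 p.2)), pvShape S M.length (pvW M) := by
    intro S hSm
    simp only [List.mem_map] at hSm
    obtain ⟨p, hp, rfl⟩ := hSm
    fin_cases hp <;> exact pvS_shape M hge _ _ (by norm_num) (by norm_num)
  obtain ⟨_, hent⟩ := foldl_pvAdd_spec M.length (pvW M) _ _ (replicate_shape _ _) hS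
  rw [hent f c hf hc, replicate_getD _ _ f c hf hc]
  simp only [List.map_cons, List.map_nil, List.sum_cons, List.sum_nil]
  rw [pvS_getD M hge (-1) (-1) (by norm_num) (by norm_num) f c hf hc,
    pvS_getD M hge (-1) 0 (by norm_num) (by norm_num) f c hf hc,
    pvS_getD M hge (-1) 1 (by norm_num) (by norm_num) f c hf hc,
    pvS_getD M hge 0 (-1) (by norm_num) (by norm_num) f c hf hc,
    pvS_getD M hge 0 1 (by norm_num) (by norm_num) f c hf hc,
    pvS_getD M hge 1 (-1) (by norm_num) (by norm_num) f c hf hc,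
    pvS_getD M hge 1 0 (by norm_num) (by norm_num) f c hf hc,
    pvS_getD M hge 1 1 (by norm_num) (by norm_num) f c hf hc]
  simp only [pvVec, pvRI]
  norm_num

-- ---------- A's neighbour list equals pvVec ----------

lemma vecinos_eq (M : List (List Int)) (f c : Nat) (hf : f < M.length) (hc : c < pvW M) :
    obtenerVecinos M (f : Int) (c : Int) = pvVec M f c := by
  have hh : 0 < M.length := by omega
  have hw : 0 < (PySem.List.pyGetD M 0 []).length := lt_of_le_of_lt (Nat.zero_le c) hc
  simp only [obtenerVecinos, List.foldl_cons, List.foldl_nil]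
  norm_num
  rw [show PySem.Int.mod ((f : Int) + -1) (M.length : Int) =
        (((f + (M.length - 1)) % M.length : Nat) : Int) from by
      rw [show ((f : Int) + -1) = (f : Int) - 1 by ring]; exact pvmod_sub_one f M.length hh]
  rw [show PySem.Int.mod ((c : Int) + -1) ((PySem.List.pyGetD M 0 []).length : Int) =
        (((c + ((PySem.List.pyGetD M 0 []).length - 1)) % (PySem.List.pyGetD M 0 []).length : Nat) : Int) from by
      rw [show ((c : Int) + -1) = (c : Int) - 1 by ring]; exact pvmod_sub_one c _ hw]
  rw [show PySem.Int.mod ((f : Int) + 1) (M.length : Int) =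
        (((f + 1) % M.length : Nat) : Int) from pvmod_add_one f M.length]
  rw [show PySem.Int.mod ((c : Int) + 1) ((PySem.List.pyGetD M 0 []).length : Int) =
        (((c + 1) % (PySem.List.pyGetD M 0 []).length : Nat) : Int) from pvmod_add_one c _]
  rw [show ((f : Int) % (M.length : Int)) = ((f : Nat) : Int) from by
      rw [← Int.natCast_mod, Nat.mod_eq_of_lt hf]]
  have hc' : c < (PySem.List.pyGetD M 0 []).length := hc
  rw [show ((c : Int) % ((PySem.List.pyGetD M 0 []).length : Int)) = ((c : Nat) : Int) from by
      rw [← Int.natCast_mod, Nat.mod_eq_of_lt hc']]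
  simp only [PySem.List.pyGetD_natCast, pvVec, pvN, pvW]

lemma countInt (xs : List Int) :
    ((PySem.List.count xs 1 : Nat) : Int) = (xs.map (fun u => if u = 1 then (1 : Int) else 0)).sum := by
  rw [PySem.List.count_eq]
  induction xs with
  | nil => simp
  | cons a t ih =>
    rw [List.count_cons, List.map_cons, List.sum_cons]
    by_cases hA : a = 1 <;> simp [hA] <;> push_cast [ih] <;> ring

lemma counts_eq_vivos (M : List (List Int)) (hge : ∀ row ∈ M, pvW M ≤ row.length)
    (f c : Nat) (hf : f < M.length) (hc : c < pvW M) :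
    ((countsG M).getD f []).getD c 0 =
      ((PySem.List.count (obtenerVecinos M (f : Int) (c : Int)) 1 : Nat) : Int) := by
  rw [countsG_getD M hge f c hf hc, vecinos_eq M f c hf hc, countInt]

-- ---------- per-cell equality and assembly ----------

lemma alt_eq (M : List (List Int)) :
    transicion_alt M = (PySem.List.enumerate M).map (fun fr =>
      (List.range (pvW M)).foldl (fun nr c =>
        nr.set c
          (if fr.2.getD c 0 = 0 ∧
              (PySem.List.pyGetD (countsG M) fr.1 []).getD c 0 = 2 then 1
           else if fr.2.getD c 0 = 1 then 2
           else if fr.2.getD c 0 = 2 then 0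
           else fr.2.getD c 0)) fr.2) := by
  simp only [transicion_alt, PySem.List.foldl_append_singleton_eq_map, List.nil_append,
    PySem.List.pyRange_zero_natCast, List.foldl_map, PySem.List.pySetD_natCast,
    PySem.List.pyGetD_natCast]
  rfl

lemma alt_length (M : List (List Int)) : (transicion_alt M).length = M.length := by
  rw [alt_eq, List.length_map, PySem.List.length_enumerate]

lemma alt_row (M : List (List Int)) (f : Nat) (hf : f < M.length) :
    (transicion_alt M)[f]'(by rw [alt_length]; exact hf) =
      (List.range (pvW M)).foldl (fun nr c => nr.set c (pvBval M f c)) (M[f]'hf) := by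
  have h1 : (transicion_alt M)[f]'(by rw [alt_length]; exact hf) =
      ((PySem.List.enumerate M).map (fun fr =>
        (List.range (pvW M)).foldl (fun nr c =>
          nr.set c
            (if fr.2.getD c 0 = 0 ∧
                (PySem.List.pyGetD (countsG M) fr.1 []).getD c 0 = 2 then 1
             else if fr.2.getD c 0 = 1 then 2
             else if fr.2.getD c 0 = 2 then 0
             else fr.2.getD c 0)) fr.2))[f]'(by
        rw [List.length_map, PySem.List.length_enumerate]; exact hf) := by
    congr 1
    exact alt_eq M
  rw [h1, List.getElem_map, PySem.List.getElem_enumerate]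
  simp only [zero_add, PySem.List.pyGetD_natCast, pvBval]
  congr 1
  rw [List.getD_eq_getElem _ _ hf]

lemma percell (M : List (List Int)) (hge : ∀ row ∈ M, pvW M ≤ row.length)
    (f c : Nat) (hf : f < M.length) (hc : c < pvW M) :
    pvVal M f c = pvBval M f c := by
  rw [pvVal, transicionCelula, pvBval, counts_eq_vivos M hge f c hf hc]
  have hiff : (((PySem.List.count (obtenerVecinos M (f : Int) (c : Int)) 1 : Nat) : Int) = 2) ↔
      (PySem.List.count (obtenerVecinos M (f : Int) (c : Int)) 1 = 2) := by
    omega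
  simp only [hiff]

-- ===== VERDICT (by name: the statement is the Claim_ definition above) =====
theorem transicion_spec : Claim_equal_transicion := by
  intro M _ hpre
  obtain ⟨hne, hgeH⟩ := hpre
  have hge : ∀ row ∈ M, pvW M ≤ row.length := by
    intro row hr; rw [pvW_eq_headD]; exact hgeH row hr
  unfold Spec_transicion
  apply List.ext_getElem (by rw [transicion_length, alt_length])
  intro f hf1 hf2
  have hf : f < M.length := by rwa [transicion_length] at hf1
  have hrowA := transicion_row M f hf
  have hrowB := alt_row M f hf
  rw [show (transicion M)[f]'hf1 = _ from hrowA, show (transicion_alt M)[f]'hf2 = _ from hrowB]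
  apply List.ext_getElem (by rw [rowfold_length, rowfold_length])
  intro c hc1 hc2
  have hc : c < (M[f]'hf).length := by rwa [rowfold_length] at hc1
  rw [rowfold_getElem (pvVal M f) (pvW M) (M[f]'hf) c hc,
    rowfold_getElem (pvBval M f) (pvW M) (M[f]'hf) c hc]
  by_cases hcw : c < pvW M
  · rw [if_pos hcw, if_pos hcw, percell M hge f c hf hcw]
  · rw [if_neg hcw, if_neg hcw]
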